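-- pv_equiv track=rewrite | github.com/louist3ng/Findings-Categoriser-Tool | r8_mapping.py | _split_extension
-- ===== SOURCE A (Python) =====
-- def _split_extension(path):
--     """Split a path into (base, extension) where extension includes the dot.
--
--     Handles .java, .kt, .smali and similar extensions.
--     """
--     for ext in (".java", ".kt", ".smali"):
--         if path.endswith(ext):
--             return path[:-len(ext)], ext
--     # Fallback: split on last dot
--     dot_idx = path.rfind(".")
--     if dot_idx > 0:
--         return path[:dot_idx], path[dot_idx:]
--     return path, ""
-- ===== SOURCE B (Python) =====
-- _KNOWN_EXTS = {".java", ".kt", ".smali"}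
--
--
-- def _split_extension(path):
--     """Split a path into (base, extension) where extension includes the dot."""
--     dot_idx = path.rfind(".")
--     ext = path[dot_idx:]
--     if dot_idx > 0 or ext in _KNOWN_EXTS:
--         return path[:dot_idx], ext
--     return path, ""
-- ===== Notes on version B (the rewrite author's own statement) =====
-- stated objective: simpler
-- what changed: B does one rfind first and classifies its result (index > 0, or the tail is a known extension), replacing A's scan over the known-extension tuple followed by a separate rfind fallback.
import Mathlib
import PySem

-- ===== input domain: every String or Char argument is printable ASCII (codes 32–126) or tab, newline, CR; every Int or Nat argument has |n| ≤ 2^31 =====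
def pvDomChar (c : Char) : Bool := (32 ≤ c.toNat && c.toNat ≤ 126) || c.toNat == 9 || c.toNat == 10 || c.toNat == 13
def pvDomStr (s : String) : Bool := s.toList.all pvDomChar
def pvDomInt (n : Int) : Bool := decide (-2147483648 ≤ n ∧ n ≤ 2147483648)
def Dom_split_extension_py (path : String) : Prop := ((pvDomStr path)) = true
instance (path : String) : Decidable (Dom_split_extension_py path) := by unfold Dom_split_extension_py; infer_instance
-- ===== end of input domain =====

-- B replaces A's scan over the known-extension tuple (plus a separate rfind fallback) by a single
-- rfind followed by one classification of its result (objective: simpler; same value everywhere).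

-- ===== PORT A =====
def split_extension_py (path : String) : String × String :=
  if PySem.Str.endswith path ".java" then
    (PySem.Str.slice path none (some (-5)), ".java")
  else if PySem.Str.endswith path ".kt" then
    (PySem.Str.slice path none (some (-3)), ".kt")
  else if PySem.Str.endswith path ".smali" then
    (PySem.Str.slice path none (some (-6)), ".smali")
  else
    let dotIdx := PySem.Str.rfind path "."
    if dotIdx > 0 then
      (PySem.Str.slice path none (some dotIdx), PySem.Str.slice path (some dotIdx) none)
    else (path, "")

-- ===== PORT B =====
def pvKnownExts : PySem.Set String := PySem.Set.ofList [".java", ".kt", ".smali"]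

def split_extension_py_alt (path : String) : String × String :=
  let dotIdx := PySem.Str.rfind path "."
  let ext := PySem.Str.slice path (some dotIdx) none
  if dotIdx > 0 || PySem.Set.contains pvKnownExts ext then
    (PySem.Str.slice path none (some dotIdx), ext)
  else (path, "")

-- ===== PRECONDITION & SPEC =====
def Spec_split_extension_py (path : String) (out : String × String) : Prop := out = split_extension_py_alt path
instance (path : String) (out : String × String) : Decidable (Spec_split_extension_py path out) := by unfold Spec_split_extension_py; infer_instance

-- ===== CLAIM (what is proved, stated in full; the proofs are below) =====
def Claim_equal_split_extension_py : Prop := ∀ (path : String), Dom_split_extension_py path → Spec_split_extension_py path (split_extension_py path)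

-- ===== LEMMAS AND PROOFS =====
lemma go_at (cs : List Char) (k : Nat) (h : ['.'].isPrefixOf (cs.drop k) = true) :
    PySem.Chars.rfind.go cs ['.'] k = k := by
  cases k
  · simp only [PySem.Chars.rfind.go]
    simp only [List.drop_zero] at h
    simp [h]
  · simp [PySem.Chars.rfind.go, h]

lemma go_high (cs : List Char) (k : Nat)
    (hno : ∀ i, k < i → ['.'].isPrefixOf (cs.drop i) = false) :
    ∀ j, k ≤ j → PySem.Chars.rfind.go cs ['.'] j = PySem.Chars.rfind.go cs ['.'] k := by
  intro j
  induction j with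
  | zero => intro h; have : k = 0 := by omega
            rw [this]
  | succ m ih =>
    intro h
    rcases Nat.eq_or_lt_of_le h with heq | hlt
    · rw [heq]
    · have h1 : ['.'].isPrefixOf (cs.drop (m+1)) = false := hno (m+1) hlt
      have : PySem.Chars.rfind.go cs ['.'] (m+1) = PySem.Chars.rfind.go cs ['.'] m := by
        simp [PySem.Chars.rfind.go, h1]
      rw [this]; exact ih (by omega)

lemma go_ge (cs : List Char) : ∀ j, -1 ≤ PySem.Chars.rfind.go cs ['.'] j := by
  intro j
  induction j with
  | zero => simp [PySem.Chars.rfind.go]; split <;> simp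
  | succ m ih =>
    simp only [PySem.Chars.rfind.go]
    split
    · omega
    · exact ih

lemma rfind_concat (pre tail : List Char) (htail : '.' ∉ tail) :
    PySem.Chars.rfind (pre ++ '.' :: tail) ['.'] = pre.length := by
  unfold PySem.Chars.rfind
  have hlen : (pre ++ '.' :: tail).length = pre.length + 1 + tail.length := by simp; omega
  rw [go_high (pre ++ '.' :: tail) pre.length ?no _ (by omega)]
  · exact go_at _ _ (by simp)
  case no =>
    intro i hi
    rcases Nat.lt_or_ge i (pre ++ '.' :: tail).length with hin | hout
    · have hhd : ((pre ++ '.' :: tail).drop i).head? = (pre ++ '.' :: tail)[i]? := by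
        simp [List.head?_drop]
      cases hd : (pre ++ '.' :: tail).drop i with
      | nil => simp [List.isPrefixOf]
      | cons x xs =>
        have hget : (pre ++ '.' :: tail)[i]? = some x := by
          rw [← hhd, hd]; rfl
        have hmem : x ∈ tail := by
          have h2 : ('.' :: tail)[i - pre.length]? = some x := by
            rw [← hget]; rw [List.getElem?_append_right (by omega)]
          rcases Nat.exists_eq_add_of_lt hi with ⟨m, hm⟩
          have hidx : i - pre.length = m + 1 := by omega
          rw [hidx] at h2
          simp at h2
          exact List.mem_of_getElem? h2
        have hc : x ≠ '.' := fun he => htail (he ▸ hmem)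
        simp only [List.isPrefixOf, Bool.and_eq_false_iff, beq_eq_false_iff_ne, ne_eq]
        left
        exact fun he => hc he.symm
    · rw [List.drop_eq_nil_of_le hout]; simp only [List.isPrefixOf]

lemma slice_take_clamp (cs : List Char) (b : Int) :
    PySem.List.slice cs none (some b) = cs.take (PySem.List.clampIdx cs.length b) := by
  simp [PySem.List.slice]

lemma branch_eq (path : String) (pre tail : List Char) (ext : String)
    (hpath : path.toList = pre ++ '.' :: tail)
    (htail : '.' ∉ tail)
    (hext : ext.toList = '.' :: tail)
    (hmem : PySem.Set.contains pvKnownExts ext = true) :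
    split_extension_py_alt path =
      (PySem.Str.slice path none (some (-(((1 + tail.length : Nat)) : Int))), ext) := by
  have hr : PySem.Str.rfind path "." = (pre.length : Int) := by
    show PySem.Chars.rfind path.toList ".".toList = _
    rw [hpath]
    exact rfind_concat pre tail htail
  have hlen : path.toList.length = pre.length + (1 + tail.length) := by
    rw [hpath]; simp; omega
  have hA : PySem.Str.slice path none (some (-(((1 + tail.length : Nat)) : Int))) = String.ofList pre := by
    show String.ofList (PySem.Chars.slice path.toList none _) = _
    rw [PySem.Chars.slice_eq_listSlice, slice_take_clamp]
    have hcl : PySem.List.clampIdx path.toList.length (-(((1 + tail.length : Nat)) : Int)) = pre.length := by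
      rw [PySem.List.clampIdx_neg_natCast _ _ (by omega)]
      omega
    rw [hcl, hpath, List.take_left]
  have hB : PySem.Str.slice path none (some (PySem.Str.rfind path ".")) = String.ofList pre := by
    rw [hr]
    show String.ofList (PySem.Chars.slice path.toList none _) = _
    rw [PySem.Chars.slice_eq_listSlice, PySem.List.slice_to _ (by positivity)]
    rw [hpath]
    simp
  have hExt : PySem.Str.slice path (some (PySem.Str.rfind path ".")) none = ext := by
    rw [hr]
    show String.ofList (PySem.Chars.slice path.toList _ none) = _
    rw [PySem.Chars.slice_eq_listSlice, PySem.List.slice_from _ (by positivity)]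
    rw [hpath]
    simp [← hext]
  unfold split_extension_py_alt
  simp only [hExt, hmem, Bool.or_true, if_true, hA, hB]

lemma split_extension_py_eq_alt (path : String) : split_extension_py path = split_extension_py_alt path := by
  by_cases hj : PySem.Str.endswith path ".java" = true
  · obtain ⟨pre, hpre⟩ : ∃ t, t ++ ".java".toList = path.toList :=
      (PySem.Chars.endswith_iff _ _).mp hj
    have hb := branch_eq path pre ['j','a','v','a'] ".java"
      (by rw [← hpre]; rfl) (by decide) (by rfl) (by decide)
    unfold split_extension_py
    rw [hj]
    simp only [if_true, hb]
    norm_num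
  · rw [Bool.not_eq_true] at hj
    by_cases hk : PySem.Str.endswith path ".kt" = true
    · obtain ⟨pre, hpre⟩ : ∃ t, t ++ ".kt".toList = path.toList :=
        (PySem.Chars.endswith_iff _ _).mp hk
      have hb := branch_eq path pre ['k','t'] ".kt"
        (by rw [← hpre]; rfl) (by decide) (by rfl) (by decide)
      unfold split_extension_py
      rw [hj, hk]
      simp only [if_true, Bool.false_eq_true, if_false, hb]
      norm_num
    · rw [Bool.not_eq_true] at hk
      by_cases hs : PySem.Str.endswith path ".smali" = true
      · obtain ⟨pre, hpre⟩ : ∃ t, t ++ ".smali".toList = path.toList :=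
          (PySem.Chars.endswith_iff _ _).mp hs
        have hb := branch_eq path pre ['s','m','a','l','i'] ".smali"
          (by rw [← hpre]; rfl) (by decide) (by rfl) (by decide)
        unfold split_extension_py
        rw [hj, hk, hs]
        simp only [if_true, Bool.false_eq_true, if_false, hb]
        norm_num
      · rw [Bool.not_eq_true] at hs
        unfold split_extension_py split_extension_py_alt
        rw [hj, hk, hs]
        simp only [Bool.false_eq_true, if_false]
        by_cases hpos : 0 < PySem.Chars.rfind path.toList ['.']
        · simp [hpos]
        · have hge : -1 ≤ PySem.Chars.rfind path.toList ['.'] := go_ge path.toList _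
          have hnm : PySem.Str.slice path (some (PySem.Chars.rfind path.toList ['.'])) none ∉ pvKnownExts := by
            intro hmem
            have h3 : PySem.Str.slice path (some (PySem.Chars.rfind path.toList ['.'])) none = ".java" ∨
                PySem.Str.slice path (some (PySem.Chars.rfind path.toList ['.'])) none = ".kt" ∨
                PySem.Str.slice path (some (PySem.Chars.rfind path.toList ['.'])) none = ".smali" := by
              simpa [pvKnownExts, PySem.Set.ofList, PySem.Set.add, PySem.Set.empty] using hmem
            have hcases : PySem.Chars.rfind path.toList ['.'] = -1 ∨
                PySem.Chars.rfind path.toList ['.'] = 0 := by omega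
            rcases hcases with hr1 | h0
            · -- rfind = -1 : the slice is the last character (length ≤ 1), never a known extension
              have hlist : (PySem.Str.slice path (some (PySem.Chars.rfind path.toList ['.'])) none).toList
                  = path.toList.drop (path.toList.length - 1) := by
                show (String.ofList (PySem.Chars.slice path.toList _ none)).toList = _
                rw [hr1, PySem.Chars.slice_eq_listSlice, PySem.List.slice_some_none,
                  PySem.List.clampIdx_neg_one]
                simp
              have hlen1 : (PySem.Str.slice path (some (PySem.Chars.rfind path.toList ['.'])) none).toList.length ≤ 1 := by
                rw [hlist, List.length_drop]; omega
              rcases h3 with h | h | h <;> rw [h] at hlen1 <;> simp at hlen1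
            · -- rfind = 0 : the slice is the whole path, which would end with itself
              have hslice : PySem.Str.slice path (some (PySem.Chars.rfind path.toList ['.'])) none = path := by
                show String.ofList (PySem.Chars.slice path.toList _ none) = _
                rw [h0, PySem.Chars.slice_eq_listSlice, PySem.List.slice_from _ (by omega)]
                simp
              rw [hslice] at h3
              rcases h3 with h | h | h <;> rw [h] at hj hk hs
              · exact absurd hj (by decide)
              · exact absurd hk (by decide)
              · exact absurd hs (by decide)
          simp [hpos, hnm]


-- ===== VERDICT (by name: the statement is the Claim_ definition above) =====
theorem split_extension_py_spec : Claim_equal_split_extension_py := by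
  intro path _
  exact split_extension_py_eq_alt path
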